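-- pv_equiv track=rewrite | github.com/jimmywoo1/AE-CTGAN | code/ctgan/synthesizers/ae_gan.py | get_st_ed
-- ===== SOURCE A (Python) =====
-- def get_st_ed(target_col_index,output_info):
--
--     """
--     Used to obtain the start and ending positions of the target column as per the transformed data to be used by the classifier
--     Inputs:
--     1) target_col_index -> column index of the target column used for machine learning tasks (binary/multi-classification) in the raw data
--     2) output_info -> column information corresponding to the data after applying the data transformer
--     Outputs:
--     1) starting (st) and ending (ed) positions of the target column as per the transformed data
--
--     """
--     # counter to iterate through columns
--     st = 0
--     # counter to check if the target column index has been reached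
--     c= 0
--     # counter to iterate through column information
--     tc= 0
--     # iterating until target index has reached to obtain starting position of the one-hot-encoding used to represent target column in transformed data
--     for item in output_info:
--         # exiting loop if target index has reached
--         if c==target_col_index:
--             break
--         if item[1]=='tanh':
--             st += item[0]
--         elif item[1] == 'softmax':
--             st += item[0]
--             c+=1
--         tc+=1
--
--     # obtaining the ending position by using the dimension size of the one-hot-encoding used to represent the target column
--     ed= st+output_info[tc][0]
--
--     return (st,ed)
-- ===== SOURCE B (Python) =====
-- def get_st_ed(target_col_index, output_info):
--     # index-then-slice-sum decomposition: locate the target item first, then sum prefix widths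
--     softmax_indices = [i for i, item in enumerate(output_info) if item[1] == 'softmax']
--     if target_col_index == 0:
--         tc = 0
--     else:
--         tc = softmax_indices[target_col_index - 1] + 1
--     st = sum(item[0] for item in output_info[:tc] if item[1] in ('tanh', 'softmax'))
--     ed = st + output_info[tc][0]
--     return (st, ed)
-- ===== Notes on version B (the rewrite author's own statement) =====
-- stated objective: alternative
-- what changed: Replaces A's stateful single-pass accumulator (three counters with a mid-loop break) by an index-then-slice-sum decomposition: build the list of softmax positions, derive the target item index from it, then sum the tanh/softmax widths of the prefix slice.
import Mathlib
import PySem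

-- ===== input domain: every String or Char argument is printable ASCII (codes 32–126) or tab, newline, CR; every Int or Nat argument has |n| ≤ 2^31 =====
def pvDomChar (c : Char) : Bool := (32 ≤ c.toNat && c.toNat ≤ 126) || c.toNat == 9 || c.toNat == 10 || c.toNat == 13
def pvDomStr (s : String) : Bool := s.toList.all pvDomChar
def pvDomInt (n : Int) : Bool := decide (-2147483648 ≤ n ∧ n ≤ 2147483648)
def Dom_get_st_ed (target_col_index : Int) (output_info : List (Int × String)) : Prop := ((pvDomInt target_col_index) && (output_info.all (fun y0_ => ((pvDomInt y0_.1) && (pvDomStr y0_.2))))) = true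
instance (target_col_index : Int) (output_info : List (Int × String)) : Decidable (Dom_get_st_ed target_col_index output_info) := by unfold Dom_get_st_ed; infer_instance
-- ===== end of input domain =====

-- B replaces A's single-pass accumulator by an index-then-slice-sum decomposition (alternative, same cost).

-- ===== PORT A =====
-- A's for-loop with break, carrying (st, c, tc) exactly as the Python does.
def aLoop (target st c tc : Int) : List (Int × String) → Int × Int × Int
  | [] => (st, c, tc)
  | item :: rest =>
    if c = target then (st, c, tc)
    else if item.2 = "tanh" then aLoop target (st + item.1) c (tc + 1) rest
    else if item.2 = "softmax" then aLoop target (st + item.1) (c + 1) (tc + 1) rest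
    else aLoop target st c (tc + 1) rest

def get_st_ed (target_col_index : Int) (output_info : List (Int × String)) : Int × Int :=
  let r := aLoop target_col_index 0 0 0 output_info
  let st := r.1
  let tc := r.2.2
  -- output_info[tc][0]; Pre_ guarantees the index is in range (IndexError excluded)
  let ed := st + ((PySem.List.pyGet? output_info tc).getD (0, "")).1
  (st, ed)

-- ===== PORT B =====
def get_st_ed_alt (target_col_index : Int) (output_info : List (Int × String)) : Int × Int :=
  -- softmax_indices = [i for i, item in enumerate(output_info) if item[1] == 'softmax']
  let softmax_indices : List Int :=
    (PySem.List.enumerate output_info).foldl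
      (fun acc p => if p.2.2 = "softmax" then acc ++ [p.1] else acc) []
  -- tc = 0 if target_col_index == 0 else softmax_indices[target_col_index - 1] + 1
  let tc : Int :=
    if target_col_index = 0 then 0
    else ((PySem.List.pyGet? softmax_indices (target_col_index - 1)).getD 0) + 1
  -- st = sum of widths of tanh/softmax items in output_info[:tc]
  let st : Int :=
    (PySem.List.slice output_info none (some tc)).foldl
      (fun acc item => if item.2 = "tanh" ∨ item.2 = "softmax" then acc + item.1 else acc) 0
  let ed := st + ((PySem.List.pyGet? output_info tc).getD (0, "")).1
  (st, ed)

-- ===== PRECONDITION & SPEC =====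
-- Pre_ is exactly the set of inputs on which the Python A returns (elsewhere A raises IndexError:
-- a negative target, or a target exceeding the number of softmax columns before the last item).
def Pre_get_st_ed (target_col_index : Int) (output_info : List (Int × String)) : Prop :=
  0 ≤ target_col_index ∧ output_info ≠ [] ∧
    target_col_index ≤ (output_info.dropLast.filter (fun item => item.2 = "softmax")).length

instance (target_col_index : Int) (output_info : List (Int × String)) : Decidable (Pre_get_st_ed target_col_index output_info) := by unfold Pre_get_st_ed; infer_instance

def pvWitness_get_st_ed : Int × (List (Int × String)) := (1, [(2, "tanh"), (3, "softmax"), (4, "softmax")])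

def Spec_get_st_ed (target_col_index : Int) (output_info : List (Int × String)) (out : Int × Int) : Prop := out = get_st_ed_alt target_col_index output_info
instance (target_col_index : Int) (output_info : List (Int × String)) (out : Int × Int) : Decidable (Spec_get_st_ed target_col_index output_info out) := by unfold Spec_get_st_ed; infer_instance

-- ===== CLAIM (what is proved, stated in full; the proofs are below) =====
def Claim_equal_get_st_ed : Prop := ∀ (target_col_index : Int) (output_info : List (Int × String)), Dom_get_st_ed target_col_index output_info → Pre_get_st_ed target_col_index output_info → Spec_get_st_ed target_col_index output_info (get_st_ed target_col_index output_info)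

-- ===== LEMMAS AND PROOFS =====

-- proof-side helpers: B's three intermediate values under names
def pvF (s : Int) (l : List (Int × String)) : List Int :=
  ((PySem.List.enumerate l s).filter (fun p => decide (p.2.2 = "softmax"))).map (·.1)

def pvTc (t : Int) (l : List (Int × String)) : Int :=
  if t = 0 then 0 else ((PySem.List.pyGet? (pvF 0 l) (t - 1)).getD 0) + 1

def pvSumTS (m : List (Int × String)) : Int :=
  ((m.filter (fun item => decide (item.2 = "tanh" ∨ item.2 = "softmax"))).map (·.1)).sum

lemma pvF_cons (s : Int) (x : Int × String) (l : List (Int × String)) :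
    pvF s (x :: l) = (if x.2 = "softmax" then [s] else []) ++ pvF (s + 1) l := by
  by_cases h : x.2 = "softmax" <;> simp [pvF, PySem.List.enumerate_cons, h]

lemma pvF_shift (l : List (Int × String)) : ∀ s : Int, pvF s l = (pvF 0 l).map (· + s) := by
  induction l with
  | nil => intro s; simp [pvF]
  | cons x l ih =>
    intro s
    rw [pvF_cons, pvF_cons, ih (s + 1), ih (0 + 1)]
    by_cases h : x.2 = "softmax" <;>
      simp [h, List.map_map] <;> (intro a _; ring)

lemma pvF_len (l : List (Int × String)) : ∀ s : Int,
    (pvF s l).length = (l.filter (fun item => decide (item.2 = "softmax"))).length := by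
  induction l with
  | nil => intro s; simp [pvF]
  | cons x l ih =>
    intro s
    rw [pvF_cons, List.filter_cons]
    by_cases h : x.2 = "softmax" <;> simp [h, ih (s + 1)]

lemma pvSumTS_cons (x : Int × String) (m : List (Int × String)) :
    pvSumTS (x :: m) = (if x.2 = "tanh" ∨ x.2 = "softmax" then x.1 else 0) + pvSumTS m := by
  by_cases h : x.2 = "tanh" ∨ x.2 = "softmax" <;> simp [pvSumTS, h]

-- A's loop is additive in its accumulators
lemma aLoop_shift (l : List (Int × String)) : ∀ (t st c tc : Int),
    aLoop t st c tc l =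
      (st + (aLoop (t - c) 0 0 0 l).1,
       c + (aLoop (t - c) 0 0 0 l).2.1,
       tc + (aLoop (t - c) 0 0 0 l).2.2) := by
  induction l with
  | nil => intro t st c tc; simp [aLoop]
  | cons x l ih =>
    intro t st c tc
    by_cases hc : c = t
    · have h0 : t - c = 0 := by omega
      simp [aLoop, hc]
    · have h0 : ¬ ((0 : Int) = t - c) := by omega
      by_cases h1 : x.2 = "tanh"
      · simp only [aLoop, if_neg hc, if_pos h1, if_neg h0]
        rw [ih t (st + x.1) c (tc + 1), ih (t - c) (0 + x.1) 0 (0 + 1)]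
        simp only [sub_zero]
        refine Prod.ext (by ring) (Prod.ext (by ring) (by ring))
      · by_cases h2 : x.2 = "softmax"
        · simp only [aLoop, if_neg hc, if_neg h1, if_pos h2, if_neg h0]
          rw [ih t (st + x.1) (c + 1) (tc + 1), ih (t - c) (0 + x.1) (0 + 1) (0 + 1)]
          have : t - (c + 1) = t - c - (0 + 1) := by ring
          rw [this]
          refine Prod.ext (by ring) (Prod.ext (by ring) (by ring))
        · simp only [aLoop, if_neg hc, if_neg h1, if_neg h2, if_neg h0]
          rw [ih t st c (tc + 1), ih (t - c) 0 0 (0 + 1)]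
          simp only [sub_zero]
          refine Prod.ext (by ring) (Prod.ext (by ring) (by ring))

lemma aLoop_cons_zero (x : Int × String) (l : List (Int × String)) :
    aLoop 0 0 0 0 (x :: l) = (0, 0, 0) := by
  simp [aLoop]

lemma aLoop_cons_tanh {x : Int × String} (l : List (Int × String)) {t : Int}
    (ht : t ≠ 0) (h : x.2 = "tanh") :
    aLoop t 0 0 0 (x :: l) =
      (x.1 + (aLoop t 0 0 0 l).1, (aLoop t 0 0 0 l).2.1, 1 + (aLoop t 0 0 0 l).2.2) := by
  have h0 : ¬ ((0 : Int) = t) := fun h' => ht h'.symm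
  simp only [aLoop, if_neg h0, if_pos h]
  rw [aLoop_shift l t (0 + x.1) 0 (0 + 1)]
  simp only [sub_zero]
  refine Prod.ext (by ring) (Prod.ext (by ring) (by ring))

lemma aLoop_cons_softmax {x : Int × String} (l : List (Int × String)) {t : Int}
    (ht : t ≠ 0) (h : x.2 = "softmax") :
    aLoop t 0 0 0 (x :: l) =
      (x.1 + (aLoop (t - 1) 0 0 0 l).1, 1 + (aLoop (t - 1) 0 0 0 l).2.1,
       1 + (aLoop (t - 1) 0 0 0 l).2.2) := by
  have h0 : ¬ ((0 : Int) = t) := fun h' => ht h'.symm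
  have h1 : x.2 ≠ "tanh" := by rw [h]; decide
  simp only [aLoop, if_neg h0, if_neg h1, if_pos h]
  rw [aLoop_shift l t (0 + x.1) (0 + 1) (0 + 1)]
  have he : t - (0 + 1) = t - 1 := by ring
  rw [he]
  refine Prod.ext (by ring) (Prod.ext (by ring) (by ring))

lemma aLoop_cons_other {x : Int × String} (l : List (Int × String)) {t : Int}
    (ht : t ≠ 0) (h1 : x.2 ≠ "tanh") (h2 : x.2 ≠ "softmax") :
    aLoop t 0 0 0 (x :: l) =
      ((aLoop t 0 0 0 l).1, (aLoop t 0 0 0 l).2.1, 1 + (aLoop t 0 0 0 l).2.2) := by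
  have h0 : ¬ ((0 : Int) = t) := fun h' => ht h'.symm
  simp only [aLoop, if_neg h0, if_neg h1, if_neg h2]
  rw [aLoop_shift l t 0 0 (0 + 1)]
  simp only [sub_zero]
  refine Prod.ext (by ring) (Prod.ext (by ring) (by ring))

-- A's st is the tanh/softmax width sum of the first tc items, and tc is nonneg
lemma aLoop_st (l : List (Int × String)) : ∀ t : Int,
    0 ≤ (aLoop t 0 0 0 l).2.2 ∧
    (aLoop t 0 0 0 l).1 = pvSumTS (l.take (aLoop t 0 0 0 l).2.2.toNat) := by
  induction l with
  | nil => intro t; simp [aLoop, pvSumTS]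
  | cons x l ih =>
    intro t
    by_cases hc : t = 0
    · subst hc; simp [aLoop_cons_zero, pvSumTS]
    · by_cases h1 : x.2 = "tanh"
      · obtain ⟨hnn, hst⟩ := ih t
        rw [aLoop_cons_tanh l hc h1]
        refine ⟨by simp; omega, ?_⟩
        have htn : ((1 : Int) + (aLoop t 0 0 0 l).2.2).toNat
            = (aLoop t 0 0 0 l).2.2.toNat + 1 := by omega
        simp only [htn, List.take_succ_cons, pvSumTS_cons, h1, hst]
        simp
      · by_cases h2 : x.2 = "softmax"
        · obtain ⟨hnn, hst⟩ := ih (t - 1)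
          rw [aLoop_cons_softmax l hc h2]
          refine ⟨by simp; omega, ?_⟩
          have htn : ((1 : Int) + (aLoop (t - 1) 0 0 0 l).2.2).toNat
              = (aLoop (t - 1) 0 0 0 l).2.2.toNat + 1 := by omega
          simp only [htn, List.take_succ_cons, pvSumTS_cons, h2, hst]
          simp
        · obtain ⟨hnn, hst⟩ := ih t
          rw [aLoop_cons_other l hc h1 h2]
          refine ⟨by simp; omega, ?_⟩
          have htn : ((1 : Int) + (aLoop t 0 0 0 l).2.2).toNat
              = (aLoop t 0 0 0 l).2.2.toNat + 1 := by omega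
          simp only [htn, List.take_succ_cons, pvSumTS_cons, h1, h2, hst]
          simp

-- B's index recurrences
lemma pvTc_cons_softmax {x : Int × String} {l : List (Int × String)} {t : Int}
    (h2 : x.2 = "softmax") (ht : 1 ≤ t)
    (htb : t - 1 ≤ ((l.filter (fun item => decide (item.2 = "softmax"))).length : Int)) :
    pvTc t (x :: l) = 1 + pvTc (t - 1) l := by
  have hc : t ≠ 0 := by omega
  rw [pvTc, if_neg hc, pvF_cons, if_pos h2, pvF_shift l (0 + 1)]
  by_cases ht1 : t = 1
  · subst ht1
    simp [pvTc]
  · obtain ⟨k, hke⟩ : ∃ k : Nat, t - 2 = (k : Int) := ⟨(t - 2).toNat, by omega⟩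
    have hk : k < (pvF 0 l).length := by rw [pvF_len l 0]; omega
    have he1 : t - 1 = ((k : Int)) + 1 := by omega
    have he2 : t - 1 - 1 = ((k : Int)) := by omega
    have hR : pvTc (t - 1) l = (pvF 0 l)[k] + 1 := by
      rw [pvTc, if_neg (show t - 1 ≠ 0 by omega), he2, PySem.List.pyGet?_natCast,
        List.getElem?_eq_getElem hk]
      simp
    rw [hR, he1, List.singleton_append, PySem.List.pyGet?_cons_succ,
      PySem.List.pyGet?_natCast, List.getElem?_map, List.getElem?_eq_getElem hk]
    simp; ring

lemma pvTc_cons_other {x : Int × String} {l : List (Int × String)} {t : Int}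
    (h2 : x.2 ≠ "softmax") (ht : 1 ≤ t)
    (htb : t ≤ ((l.filter (fun item => decide (item.2 = "softmax"))).length : Int)) :
    pvTc t (x :: l) = 1 + pvTc t l := by
  have hc : t ≠ 0 := by omega
  rw [pvTc, if_neg hc, pvF_cons, if_neg h2, pvF_shift l (0 + 1)]
  obtain ⟨k, hke⟩ : ∃ k : Nat, t - 1 = (k : Int) := ⟨(t - 1).toNat, by omega⟩
  have hk : k < (pvF 0 l).length := by rw [pvF_len l 0]; omega
  have hR : pvTc t l = (pvF 0 l)[k] + 1 := by
    rw [pvTc, if_neg hc, hke, PySem.List.pyGet?_natCast, List.getElem?_eq_getElem hk]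
    simp
  rw [hR, hke, List.nil_append, PySem.List.pyGet?_natCast, List.getElem?_map,
    List.getElem?_eq_getElem hk]
  simp; ring

-- A's final index equals B's derived index, under Pre_
lemma aLoop_tc (l : List (Int × String)) : ∀ t : Int,
    0 ≤ t → t ≤ ((l.dropLast.filter (fun item => decide (item.2 = "softmax"))).length : Int) →
    l ≠ [] → (aLoop t 0 0 0 l).2.2 = pvTc t l := by
  induction l with
  | nil => intro t _ _ h; exact absurd rfl h
  | cons x l ih =>
    intro t ht0 htb _
    by_cases hc : t = 0
    · subst hc; simp [aLoop_cons_zero, pvTc]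
    · have ht1 : 1 ≤ t := by omega
      have hlne : l ≠ [] := by
        rintro rfl
        simp [List.dropLast] at htb; omega
      have hdl : (x :: l).dropLast = x :: l.dropLast := List.dropLast_cons_of_ne_nil hlne
      have hmono : ((l.dropLast.filter (fun item => decide (item.2 = "softmax"))).length : Int)
          ≤ ((l.filter (fun item => decide (item.2 = "softmax"))).length : Int) := by
        exact_mod_cast (l.dropLast_sublist.filter _).length_le
      rw [hdl, List.filter_cons] at htb
      by_cases h2 : x.2 = "softmax"
      · have htb' : t - 1
            ≤ ((l.dropLast.filter (fun item => decide (item.2 = "softmax"))).length : Int) := by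
          simp [h2] at htb; omega
        rw [aLoop_cons_softmax l hc h2, ih (t - 1) (by omega) htb' hlne,
          pvTc_cons_softmax h2 ht1 (by omega)]
      · by_cases h1 : x.2 = "tanh"
        · have htb' : t
              ≤ ((l.dropLast.filter (fun item => decide (item.2 = "softmax"))).length : Int) := by
            simp [h2] at htb; omega
          rw [aLoop_cons_tanh l hc h1, ih t ht0 htb' hlne, pvTc_cons_other h2 ht1 (by omega)]
        · have htb' : t
              ≤ ((l.dropLast.filter (fun item => decide (item.2 = "softmax"))).length : Int) := by
            simp [h2] at htb; omega
          rw [aLoop_cons_other l hc h1 h2, ih t ht0 htb' hlne, pvTc_cons_other h2 ht1 (by omega)]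

-- B's port, expressed through the proof-side names (requires the derived index to be nonneg)
lemma alt_eq (t : Int) (l : List (Int × String)) (hnn : 0 ≤ pvTc t l) :
    get_st_ed_alt t l =
      (pvSumTS (l.take (pvTc t l).toNat),
       pvSumTS (l.take (pvTc t l).toNat) + ((PySem.List.pyGet? l (pvTc t l)).getD (0, "")).1) := by
  have hF : (PySem.List.enumerate l).foldl
      (fun acc p => if p.2.2 = "softmax" then acc ++ [p.1] else acc) ([] : List Int)
      = pvF 0 l := by
    rw [PySem.List.foldl_append_ite]
    simp [pvF]
  have hst : (PySem.List.slice l none (some (pvTc t l))).foldl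
      (fun acc item => if item.2 = "tanh" ∨ item.2 = "softmax" then acc + item.1 else acc) 0
      = pvSumTS (l.take (pvTc t l).toNat) := by
    rw [PySem.List.slice_to l hnn, PySem.List.foldl_ite_eq_foldl_filter,
      PySem.List.foldl_add (g := fun item : Int × String => item.1)]
    simp [pvSumTS]
  simp only [get_st_ed_alt, hF]
  rw [show (if t = 0 then (0 : Int) else ((PySem.List.pyGet? (pvF 0 l) (t - 1)).getD 0) + 1)
      = pvTc t l from rfl]
  rw [hst]

-- ===== VERDICT (by name: the statement is the Claim_ definition above) =====
theorem get_st_ed_spec : Claim_equal_get_st_ed := by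
  intro t l _ hpre
  obtain ⟨ht0, hlne, htb⟩ := hpre
  have h1 := aLoop_st l t
  have h2 := aLoop_tc l t ht0 htb hlne
  unfold Spec_get_st_ed
  rw [alt_eq t l (h2 ▸ h1.1)]
  simp only [get_st_ed, h1.2, h2]
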